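-- pv_equiv track=rewrite | github.com/zhu2qian1/analyze-statink-json | src/main.py | find_most_golden_eggs
-- ===== SOURCE A (Python) =====
-- def find_most_golden_eggs(list: list[dict]):
--     max = 0
--     ids = []
--     for i in list:
--         ge = i["golden_eggs"]
--         if ge > max:
--             max = ge
--             ids.clear()
--             ids = [i["id"]]
--         elif ge == max:
--             ids.append(i["id"])
--     return ids
-- ===== SOURCE B (Python) =====
-- def find_most_golden_eggs(list: list[dict]):
--     m = 0
--     for i in list:
--         if i["golden_eggs"] > m:
--             m = i["golden_eggs"]
--     return [i["id"] for i in list if i["golden_eggs"] == m]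
-- ===== Notes on version B (the rewrite author's own statement) =====
-- stated objective: simpler
-- what changed: B splits A's single stateful pass (running max plus a clear/append id list) into a max-only scan followed by a comprehension selecting ids equal to that max.
import Mathlib
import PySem

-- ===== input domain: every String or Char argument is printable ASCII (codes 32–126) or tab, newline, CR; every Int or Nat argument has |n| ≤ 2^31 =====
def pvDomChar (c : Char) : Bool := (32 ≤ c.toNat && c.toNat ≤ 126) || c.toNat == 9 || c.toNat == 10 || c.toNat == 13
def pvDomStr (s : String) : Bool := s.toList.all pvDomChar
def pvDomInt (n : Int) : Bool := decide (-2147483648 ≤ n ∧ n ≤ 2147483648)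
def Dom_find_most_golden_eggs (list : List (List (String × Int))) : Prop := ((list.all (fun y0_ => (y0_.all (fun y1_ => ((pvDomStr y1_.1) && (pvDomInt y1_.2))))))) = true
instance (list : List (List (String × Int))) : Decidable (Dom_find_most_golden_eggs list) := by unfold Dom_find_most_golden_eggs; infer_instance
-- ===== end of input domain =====

-- B replaces A's single stateful pass (running max + clear/append id list) by a max-only scan
-- followed by a filtering comprehension over the ids; objective: simpler. Proved equal on Pre_.


-- ===== PORT A =====
-- i["golden_eggs"] / i["id"]: dict lookup; KeyError (none) is excluded by Pre_, so getD 0 is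
-- only the totaliser and is never the value used on admitted inputs.
def pvGE (i : List (String × Int)) : Int := ((PySem.Dict.mk i).get? "golden_eggs").getD 0
def pvID (i : List (String × Int)) : Int := ((PySem.Dict.mk i).get? "id").getD 0

def find_most_golden_eggs (list : List (List (String × Int))) : List Int :=
  (list.foldl (fun (st : Int × List Int) i =>
      let ge := pvGE i
      if ge > st.1 then (ge, [pvID i])
      else if ge = st.1 then (st.1, st.2 ++ [pvID i])
      else st)
    (0, [])).2

-- ===== PORT B =====
def find_most_golden_eggs_alt (list : List (List (String × Int))) : List Int :=
  let m := list.foldl (fun m i => if pvGE i > m then pvGE i else m) 0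
  (list.filter (fun i => pvGE i = m)).map pvID

-- ===== PRECONDITION & SPEC =====
-- max(0, max of golden_eggs over the first j items) — A's running max before item j, in closed form.
def pvPrefMax (l : List (List (String × Int))) (j : Nat) : Int :=
  ((l.take j).map (fun i => ((PySem.Dict.mk i).get? "golden_eggs").getD 0)).foldr max 0

-- Pre_ is exactly where Python A returns: it raises KeyError at item j iff that dict lacks
-- "golden_eggs", or lacks "id" while its golden_eggs count ties or beats the running max so far.
def Pre_find_most_golden_eggs (list : List (List (String × Int))) : Prop :=
  ∀ j ∈ List.range list.length,
    ((PySem.Dict.mk (list.getD j [])).get? "golden_eggs").isSome ∧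
    (((PySem.Dict.mk (list.getD j [])).get? "id").isSome ∨
      ((PySem.Dict.mk (list.getD j [])).get? "golden_eggs").getD 0 < pvPrefMax list j)
instance (list : List (List (String × Int))) : Decidable (Pre_find_most_golden_eggs list) := by
  unfold Pre_find_most_golden_eggs; infer_instance
def pvWitness_find_most_golden_eggs : (List (List (String × Int))) :=
  [[("golden_eggs", 3), ("id", 1)], [("golden_eggs", 3), ("id", 2)]]

def Spec_find_most_golden_eggs (list : List (List (String × Int))) (out : List Int) : Prop := out = find_most_golden_eggs_alt list
instance (list : List (List (String × Int))) (out : List Int) : Decidable (Spec_find_most_golden_eggs list out) := by unfold Spec_find_most_golden_eggs; infer_instance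

-- ===== CLAIM (what is proved, stated in full; the proofs are below) =====
def Claim_equal_find_most_golden_eggs : Prop := ∀ (list : List (List (String × Int))), Dom_find_most_golden_eggs list → Pre_find_most_golden_eggs list → Spec_find_most_golden_eggs list (find_most_golden_eggs list)

-- ===== LEMMAS AND PROOFS =====

-- B's max scan, started from m.
def pvFmax (l : List (List (String × Int))) (m : Int) : Int :=
  l.foldl (fun m i => if pvGE i > m then pvGE i else m) m

lemma pvFmax_nil (m : Int) : pvFmax [] m = m := rfl

lemma pvFmax_cons (i : List (String × Int)) (l : List (List (String × Int))) (m : Int) :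
    pvFmax (i :: l) m = pvFmax l (if pvGE i > m then pvGE i else m) := rfl

lemma le_pvFmax (l : List (List (String × Int))) (m : Int) : m ≤ pvFmax l m := by
  induction l generalizing m with
  | nil => simp [pvFmax_nil]
  | cons i l ih =>
    rw [pvFmax_cons]
    split
    · exact le_trans (le_of_lt (by assumption)) (ih _)
    · exact ih _

-- The invariant of A's loop: the final max is pvFmax, and the id list is the kept accumulator
-- (kept iff no strictly larger egg count appears) followed by the ids of the items tying the max.
lemma foldA_characterisation (l : List (List (String × Int))) (m : Int) (acc : List Int) :
    l.foldl (fun (st : Int × List Int) i =>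
        let ge := pvGE i
        if ge > st.1 then (ge, [pvID i])
        else if ge = st.1 then (st.1, st.2 ++ [pvID i])
        else st) (m, acc)
      = (pvFmax l m,
         (if pvFmax l m = m then acc else []) ++ (l.filter (fun i => pvGE i = pvFmax l m)).map pvID) := by
  induction l generalizing m acc with
  | nil => simp [pvFmax_nil]
  | cons i l ih =>
    simp only [List.foldl_cons]
    by_cases h1 : pvGE i > m
    · rw [if_pos h1, ih]
      have hF : pvFmax (i :: l) m = pvFmax l (pvGE i) := by rw [pvFmax_cons, if_pos h1]
      have hne : pvFmax (i :: l) m ≠ m := by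
        rw [hF]; exact ne_of_gt (lt_of_lt_of_le h1 (le_pvFmax _ _))
      rw [hF] at *
      by_cases h2 : pvFmax l (pvGE i) = pvGE i
      · rw [if_pos h2, if_neg hne, List.filter_cons_of_pos (by simp [h2]), List.map_cons]
        simp
      · have : pvGE i ≠ pvFmax l (pvGE i) := fun h => h2 h.symm
        simp [this, hne, h2]
    · rw [if_neg h1]
      have hF : pvFmax (i :: l) m = pvFmax l m := by rw [pvFmax_cons, if_neg h1]
      by_cases h2 : pvGE i = m
      · rw [if_pos h2, ih]
        by_cases h3 : pvFmax l m = m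
        · simp [hF, h3, h2]
        · have : ¬ pvGE i = pvFmax l m := by rw [h2]; exact fun h => h3 h.symm
          simp [hF, h3, this]
      · rw [if_neg h2, ih]
        have hlt : pvGE i < m := lt_of_le_of_ne (not_lt.mp h1) h2
        have : ¬ pvGE i = pvFmax l m := ne_of_lt (lt_of_lt_of_le hlt (le_pvFmax _ _))
        simp [hF, this]

-- ===== VERDICT (by name: the statement is the Claim_ definition above) =====
theorem find_most_golden_eggs_spec : Claim_equal_find_most_golden_eggs := by
  intro list _ _
  unfold Spec_find_most_golden_eggs find_most_golden_eggs find_most_golden_eggs_alt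
  rw [foldA_characterisation]
  simp [pvFmax]
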